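-- pv_equiv track=rewrite | github.com/Maria210501/TFG_maria | src/FeatureExtraction.py | find_blocks
-- ===== SOURCE A (Python) =====
-- def find_blocks(list):
--     """
--     English:
--     This function takes a list of positions as input and returns a list of
--     tuples. Each tuple represents a group of consecutive positions that are
--     within a certain distance (in this case, less than 5 units apart).
--
--     Spanish:
--     Esta función toma una lista de posiciones como entrada y devuelve una
--     lista de tuplas. Cada tupla representa un grupo de posiciones consecutivas
--     que están a una distancia menor a 5 unidades.
--     """
--     blocks = []
--     current_block = [list[0]]
--
--     for i in range(1, len(list)):
--         if list[i] - list[i - 1] < 5: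
--             current_block.append(list[i])
--         else:
--             blocks.append(tuple(current_block))
--             current_block = [list[i]]
--
--     blocks.append(tuple(current_block))
--     return blocks
-- ===== SOURCE B (Python) =====
-- def find_blocks(list):
--     cuts = [i for i in range(1, len(list)) if list[i] - list[i - 1] >= 5]
--     bounds = [0] + cuts + [len(list)]
--     return [tuple(list[a:b]) for a, b in zip(bounds, bounds[1:])]
-- ===== Notes on version B (the rewrite author's own statement) =====
-- stated objective: alternative
-- what changed: B computes the cut indices in one comprehension and builds the blocks by slicing between consecutive boundaries, instead of accumulating a running current_block with an append-or-flush state machine.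
import Mathlib
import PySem

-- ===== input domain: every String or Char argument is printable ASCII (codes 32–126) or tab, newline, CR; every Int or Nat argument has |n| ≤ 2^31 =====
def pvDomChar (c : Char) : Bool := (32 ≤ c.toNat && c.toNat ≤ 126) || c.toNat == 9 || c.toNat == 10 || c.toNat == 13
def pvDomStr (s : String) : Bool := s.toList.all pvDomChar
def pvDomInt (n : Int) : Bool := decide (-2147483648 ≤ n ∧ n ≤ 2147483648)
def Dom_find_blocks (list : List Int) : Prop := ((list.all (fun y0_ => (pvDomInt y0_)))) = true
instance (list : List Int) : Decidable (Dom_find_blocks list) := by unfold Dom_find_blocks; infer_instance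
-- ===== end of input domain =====

-- B builds blocks by slicing at the break indices instead of A's running current_block accumulator (alternative decomposition, same cost).

-- ===== PORT A =====
-- A: blocks/current_block state machine over i in range(1, len(list)); reading the first element raises IndexError on empty input.
def find_blocks (list : List Int) : List (List Int) :=
  match PySem.List.pyGet? list 0 with
  | none => []   -- IndexError on empty input: excluded by Pre_find_blocks
  | some h0 =>
    let s := (PySem.List.pyRange 1 (list.length : Int) 1).foldl
      (fun (st : List (List Int) × List Int) i =>
        if PySem.List.pyGetD list i 0 - PySem.List.pyGetD list (i - 1) 0 < 5 then
          (st.1, st.2 ++ [PySem.List.pyGetD list i 0])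
        else
          (st.1 ++ [st.2], [PySem.List.pyGetD list i 0]))
      ([], [h0])
    s.1 ++ [s.2]

-- ===== PORT B =====
-- B: cut indices, then boundaries, then slices between consecutive boundaries.
def find_blocks_alt (list : List Int) : List (List Int) :=
  let cuts := (PySem.List.pyRange 1 (list.length : Int) 1).filter
      (fun i => 5 ≤ PySem.List.pyGetD list i 0 - PySem.List.pyGetD list (i - 1) 0)
  let bounds : List Int := 0 :: cuts ++ [(list.length : Int)]
  (bounds.zip (PySem.List.slice bounds (some 1) none)).map
      (fun ab => PySem.List.slice list (some ab.1) (some ab.2))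

-- ===== PRECONDITION & SPEC =====
-- Pre_ excludes only the empty list, on which A raises IndexError when reading the first element.
def Pre_find_blocks (list : List Int) : Prop := list ≠ []
instance (list : List Int) : Decidable (Pre_find_blocks list) := by unfold Pre_find_blocks; infer_instance
def pvWitness_find_blocks : List Int := ([3, 4, 11])

def Spec_find_blocks (list : List Int) (out : List (List Int)) : Prop := out = find_blocks_alt list
instance (list : List Int) (out : List (List Int)) : Decidable (Spec_find_blocks list out) := by unfold Spec_find_blocks; infer_instance

-- ===== CLAIM (what is proved, stated in full; the proofs are below) =====
def Claim_equal_find_blocks : Prop := ∀ (list : List Int), Dom_find_blocks list → Pre_find_blocks list → Spec_find_blocks list (find_blocks list)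

-- ===== LEMMAS AND PROOFS =====

-- the common snoc-step both implementations satisfy
def pvSnocStep (bs : List (List Int)) (p x : Int) : List (List Int) :=
  if x - p < 5 then bs.dropLast ++ [bs.getLastD [] ++ [x]] else bs ++ [[x]]

theorem find_blocks_singleton (x : Int) : find_blocks [x] = [[x]] := by
  simp [find_blocks, PySem.List.pyRange_one_eq_nil]

theorem find_blocks_alt_singleton (x : Int) : find_blocks_alt [x] = [[x]] := by
  simp [find_blocks_alt, PySem.List.pyRange_one_eq_nil, PySem.List.slice_from_one,
    PySem.List.slice_zero_start, PySem.List.slice_to]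

-- indexing an appended list below the old length is indexing the old list
theorem pvGetD_app_lt (xs : List Int) (x i : Int) (h0 : 0 ≤ i) (h : i < (xs.length : Int)) :
    PySem.List.pyGetD (xs ++ [x]) i 0 = PySem.List.pyGetD xs i 0 := by
  rw [PySem.List.pyGetD_eq_getElem (xs ++ [x]) 0 h0 (by simp; try omega),
      PySem.List.pyGetD_eq_getElem xs 0 h0 h]
  exact List.getElem_append_left (by omega)

theorem pvGetD_app_len (xs : List Int) (x : Int) :
    PySem.List.pyGetD (xs ++ [x]) (xs.length : Int) 0 = x := by
  rw [PySem.List.pyGetD_natCast]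
  simp [List.getD]

theorem pvGetD_app_pred (xs : List Int) (x : Int) (h : xs ≠ []) :
    PySem.List.pyGetD (xs ++ [x]) ((xs.length : Int) - 1) 0 = xs.getLast h := by
  have hl : 0 < xs.length := List.length_pos_of_ne_nil h
  rw [PySem.List.pyGetD_eq_getElem (xs ++ [x]) 0 (by omega) (by simp; try omega)]
  rw [List.getElem_append_left (by omega)]
  rw [List.getLast_eq_getElem]
  congr 1
  omega

theorem pvGet0_app (xs : List Int) (x : Int) (h : xs ≠ []) :
    PySem.List.pyGet? (xs ++ [x]) 0 = some (xs[0]'(List.length_pos_of_ne_nil h)) := by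
  rw [PySem.List.pyGet?_zero, List.getElem?_append_left (by simpa using List.length_pos_of_ne_nil h)]
  exact List.getElem?_eq_getElem _

theorem pvGet0 (xs : List Int) (h : xs ≠ []) :
    PySem.List.pyGet? xs 0 = some (xs[0]'(List.length_pos_of_ne_nil h)) := by
  rw [PySem.List.pyGet?_zero]
  exact List.getElem?_eq_getElem _

-- slicing an appended list with both bounds within the old list
theorem pvSlice_app (xs : List Int) (x a b : Int) (ha : 0 ≤ a) (hb : 0 ≤ b)
    (hbn : b ≤ (xs.length : Int)) :
    PySem.List.slice (xs ++ [x]) (some a) (some b) = PySem.List.slice xs (some a) (some b) := by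
  rw [PySem.List.slice_toNat (xs ++ [x]) ha hb, PySem.List.slice_toNat xs ha hb]
  by_cases hax : a.toNat ≤ xs.length
  · rw [List.drop_append_of_le_length hax, List.take_append_of_le_length (by simp; try omega)]
  · have : b.toNat - a.toNat = 0 := by omega
    simp [this]

-- slicing an appended list up to the new length: the old tail slice plus the new element
theorem pvSlice_app_full (xs : List Int) (x c : Int) (hc : 0 ≤ c) (hcn : c ≤ (xs.length : Int)) :
    PySem.List.slice (xs ++ [x]) (some c) (some ((xs.length : Int) + 1)) =
      PySem.List.slice xs (some c) (some (xs.length : Int)) ++ [x] := by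
  rw [PySem.List.slice_toNat (xs ++ [x]) hc (by omega), PySem.List.slice_toNat xs hc (by omega)]
  rw [List.drop_append_of_le_length (by omega)]
  rw [List.take_of_length_le (by simp; try omega), List.take_of_length_le (by simp; try omega)]

-- consecutive pairs of a snoc list
theorem pvZipTail_snoc (ys : List Int) (v : Int) (h : ys ≠ []) :
    (ys ++ [v]).zip ((ys ++ [v]).tail) = ys.zip ys.tail ++ [(ys.getLast h, v)] := by
  induction ys with
  | nil => exact absurd rfl h
  | cons a ys ih =>
    cases ys with
    | nil => simp
    | cons b ys' =>
      have := ih (by simp)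
      simp only [List.cons_append, List.zip_cons_cons, List.tail_cons] at this ⊢
      rw [this]
      simp [List.getLast_cons]

theorem find_blocks_snoc (xs : List Int) (x : Int) (h : xs ≠ []) :
    find_blocks (xs ++ [x]) = pvSnocStep (find_blocks xs) (xs.getLast h) x := by
  have hl : 0 < xs.length := List.length_pos_of_ne_nil h
  have hn : 1 ≤ (xs.length : Int) := by omega
  unfold find_blocks
  rw [pvGet0_app xs x h, pvGet0 xs h]
  dsimp only
  have hlen : ((xs ++ [x]).length : Int) = (xs.length : Int) + 1 := by simp
  rw [hlen, PySem.List.pyRange_one_succ_right hn, List.foldl_append]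
  simp only [List.foldl_cons, List.foldl_nil]
  have hcong :
      (PySem.List.pyRange 1 (xs.length : Int) 1).foldl
        (fun (st : List (List Int) × List Int) i =>
          if PySem.List.pyGetD (xs ++ [x]) i 0 - PySem.List.pyGetD (xs ++ [x]) (i - 1) 0 < 5 then
            (st.1, st.2 ++ [PySem.List.pyGetD (xs ++ [x]) i 0])
          else
            (st.1 ++ [st.2], [PySem.List.pyGetD (xs ++ [x]) i 0]))
        ([], [xs[0]'hl]) =
      (PySem.List.pyRange 1 (xs.length : Int) 1).foldl
        (fun (st : List (List Int) × List Int) i =>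
          if PySem.List.pyGetD xs i 0 - PySem.List.pyGetD xs (i - 1) 0 < 5 then
            (st.1, st.2 ++ [PySem.List.pyGetD xs i 0])
          else
            (st.1 ++ [st.2], [PySem.List.pyGetD xs i 0]))
        ([], [xs[0]'hl]) := by
    apply PySem.List.foldl_congr_mem
    intro acc i hi
    rw [PySem.List.mem_pyRange_one] at hi
    rw [pvGetD_app_lt xs x i (by omega) (by omega),
        pvGetD_app_lt xs x (i - 1) (by omega) (by omega)]
  rw [hcong]
  rw [pvGetD_app_len xs x, pvGetD_app_pred xs x h]
  unfold pvSnocStep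
  by_cases hbr : x - xs.getLast h < 5 <;> simp [hbr]

theorem find_blocks_alt_snoc (xs : List Int) (x : Int) (h : xs ≠ []) :
    find_blocks_alt (xs ++ [x]) = pvSnocStep (find_blocks_alt xs) (xs.getLast h) x := by
  have hl : 0 < xs.length := List.length_pos_of_ne_nil h
  have hn : 1 ≤ (xs.length : Int) := by omega
  unfold find_blocks_alt
  simp only [PySem.List.slice_from_one]
  have hlen : ((xs ++ [x]).length : Int) = (xs.length : Int) + 1 := by simp
  rw [hlen, PySem.List.pyRange_one_succ_right hn, List.filter_append]
  set P : Int → Bool :=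
    fun i => decide (5 ≤ PySem.List.pyGetD xs i 0 - PySem.List.pyGetD xs (i - 1) 0) with hP
  have hfc :
      (PySem.List.pyRange 1 (xs.length : Int) 1).filter
        (fun i => decide (5 ≤ PySem.List.pyGetD (xs ++ [x]) i 0 -
            PySem.List.pyGetD (xs ++ [x]) (i - 1) 0)) =
      (PySem.List.pyRange 1 (xs.length : Int) 1).filter P := by
    apply List.filter_congr
    intro i hi
    rw [PySem.List.mem_pyRange_one] at hi
    rw [pvGetD_app_lt xs x i (by omega) (by omega),
        pvGetD_app_lt xs x (i - 1) (by omega) (by omega)]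
  rw [hfc]
  simp only [List.filter_singleton]
  rw [pvGetD_app_len xs x, pvGetD_app_pred xs x h]
  set cuts := (PySem.List.pyRange 1 (xs.length : Int) 1).filter P with hcuts
  have hmemc : ∀ i ∈ cuts, 1 ≤ i ∧ i < (xs.length : Int) := by
    intro i hi
    exact (PySem.List.mem_pyRange_one).mp (List.mem_of_mem_filter hi)
  -- pairs over the old boundaries carry endpoints within xs
  have hmapc : ∀ (bs : List Int), (∀ a ∈ bs, 0 ≤ a) → (∀ b ∈ bs.tail, b ≤ (xs.length : Int)) →
      (bs.zip bs.tail).map (fun ab => PySem.List.slice (xs ++ [x]) (some ab.1) (some ab.2)) =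
      (bs.zip bs.tail).map (fun ab => PySem.List.slice xs (some ab.1) (some ab.2)) := by
    intro bs h0 h1
    apply List.map_congr_left
    intro ab hab
    have hm := List.of_mem_zip hab
    exact pvSlice_app xs x ab.1 ab.2 (h0 _ hm.1) (h0 _ (List.mem_of_mem_tail hm.2)) (h1 _ hm.2)
  unfold pvSnocStep
  by_cases hbr : x - xs.getLast h < 5
  · -- no new cut: last boundary moves from n to n+1
    have hdec : decide ((5:Int) ≤ x - xs.getLast h) = false := decide_eq_false (by omega)
    rw [if_pos hbr]
    simp only [hdec, Bool.cond_false, List.append_nil]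
    have hb1 : (0 :: cuts) ++ [(xs.length : Int) + 1] ≠ [] := by simp
    rw [show (0 : Int) :: cuts ++ [(xs.length : Int) + 1] = ((0 :: cuts) ++ [(xs.length : Int) + 1]) from rfl,
        show (0 : Int) :: cuts ++ [(xs.length : Int)] = ((0 :: cuts) ++ [(xs.length : Int)]) from rfl,
        pvZipTail_snoc (0 :: cuts) ((xs.length : Int) + 1) (by simp),
        pvZipTail_snoc (0 :: cuts) (xs.length : Int) (by simp)]
    rw [List.map_append, List.map_append]
    have h0b : ∀ a ∈ (0 : Int) :: cuts, 0 ≤ a := by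
      intro a ha
      rcases List.mem_cons.mp ha with rfl | ha
      · omega
      · exact le_of_lt (by have := hmemc a ha; omega)
    have h1b : ∀ b ∈ ((0 : Int) :: cuts).tail, b ≤ (xs.length : Int) := by
      intro b hb
      have := hmemc b hb
      omega
    rw [hmapc _ h0b h1b]
    have hglast : ∀ hgl, ((0 : Int) :: cuts).getLast hgl ∈ (0 : Int) :: cuts :=
      fun hgl => List.getLast_mem hgl
    have hc0 : 0 ≤ ((0 : Int) :: cuts).getLast (by simp) := h0b _ (hglast _)
    have hcn : ((0 : Int) :: cuts).getLast (by simp) ≤ (xs.length : Int) := by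
      rcases List.mem_cons.mp (hglast (by simp)) with he | he
      · omega
      · have := hmemc _ he; omega
    rw [List.map_singleton, List.map_singleton,
        pvSlice_app_full xs x _ hc0 hcn]
    simp
  · -- a new cut at index n: a fresh one-element block
    have hdec : decide ((5:Int) ≤ x - xs.getLast h) = true := decide_eq_true (by omega)
    rw [if_neg hbr]
    simp only [hdec, Bool.cond_true]
    have hbds : (0 : Int) :: (cuts ++ [(xs.length : Int)]) ++ [(xs.length : Int) + 1] =
        ((0 :: cuts ++ [(xs.length : Int)]) ++ [(xs.length : Int) + 1]) := by simp
    rw [hbds, pvZipTail_snoc (0 :: cuts ++ [(xs.length : Int)]) ((xs.length : Int) + 1) (by simp)]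
    rw [List.map_append]
    have h0b : ∀ a ∈ (0 : Int) :: cuts ++ [(xs.length : Int)], 0 ≤ a := by
      intro a ha
      rcases List.mem_cons.mp ha with rfl | ha
      · omega
      · rcases List.mem_append.mp ha with ha | ha
        · have := hmemc a ha; omega
        · simp at ha; omega
    have h1b : ∀ b ∈ ((0 : Int) :: cuts ++ [(xs.length : Int)]).tail, b ≤ (xs.length : Int) := by
      intro b hb
      rcases List.mem_append.mp hb with hb | hb
      · have := hmemc b hb; omega
      · simp at hb; omega
    rw [hmapc _ h0b h1b]
    have hgl : ((0 : Int) :: cuts ++ [(xs.length : Int)]).getLast (by simp) = (xs.length : Int) :=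
      List.getLast_concat (l := (0 : Int) :: cuts)
    rw [List.map_singleton, hgl]
    have hsl : PySem.List.slice (xs ++ [x]) (some (xs.length : Int)) (some ((xs.length : Int) + 1)) = [x] := by
      rw [PySem.List.slice_toNat (xs ++ [x]) (by omega) (by omega)]
      simp
    rw [hsl]

-- ===== VERDICT (by name: the statement is the Claim_ definition above) =====
theorem find_blocks_spec : Claim_equal_find_blocks := by
  intro list hdom hpre
  unfold Spec_find_blocks
  induction list using List.reverseRecOn with
  | nil => exact absurd rfl hpre
  | append_singleton xs x ih =>
    rcases eq_or_ne xs [] with rfl | hxs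
    · simp [find_blocks_singleton, find_blocks_alt_singleton]
    · have hd : Dom_find_blocks xs := by
        unfold Dom_find_blocks at hdom ⊢
        simp only [List.all_append, Bool.and_eq_true] at hdom
        exact hdom.1
      rw [find_blocks_snoc xs x hxs, find_blocks_alt_snoc xs x hxs, ih hd hxs]
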